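-- pv_equiv track=rewrite | github.com/need-singularity/n6-architecture | scripts/empirical/lmfdb_cremona_fetch.py | compute_sel_size_3
-- ===== SOURCE A (Python) =====
-- def compute_sel_size_3(rank: int, torsion_structure: list, sha: int | None) -> int | None:
--     """|Sel_3(E)| 근사"""
--     if sha is None:
--         return None
--     t_3 = sum(1 for ts in torsion_structure if ts % 3 == 0)
--     s_3 = 0
--     sha_tmp = sha
--     while sha_tmp % 9 == 0:
--         s_3 += 1
--         sha_tmp //= 9
--     if sha_tmp % 3 == 0:
--         s_3 += 1
--     return 3 ** (rank + t_3 + s_3)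
-- ===== SOURCE B (Python) =====
-- def compute_sel_size_3(rank: int, torsion_structure: list, sha: int | None) -> int | None:
--     """|Sel_3(E)| approximation: sha is never divided; a growing modulus t = 3, 27, 243, ...
--     (the odd powers of 3) is tested against sha, and one accumulator e collects the exponent."""
--     if sha is None:
--         return None
--     e = rank
--     for ts in torsion_structure:
--         if ts % 3 == 0:
--             e += 1
--     t = 3
--     while sha % t == 0:
--         e += 1
--         t *= 9
--     return 3 ** e
-- ===== Notes on version B (the rewrite author's own statement) =====
-- stated objective: alternative
-- what changed: sha is never divided: B tests sha against a growing modulus t = 3, 27, 243, ... (the odd powers of 3) and counts the passing tests into a single exponent accumulator that also absorbs rank and the torsion count, instead of A's divide-sha-by-9 loop with a trailing mod-3 fixup and separate t_3/s_3 variables.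
-- outside the precondition, e.g. on compute_sel_size_3(-1, [], 1): A returns 0.3333333333333333, B returns 0.3333333333333333
import Mathlib
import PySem

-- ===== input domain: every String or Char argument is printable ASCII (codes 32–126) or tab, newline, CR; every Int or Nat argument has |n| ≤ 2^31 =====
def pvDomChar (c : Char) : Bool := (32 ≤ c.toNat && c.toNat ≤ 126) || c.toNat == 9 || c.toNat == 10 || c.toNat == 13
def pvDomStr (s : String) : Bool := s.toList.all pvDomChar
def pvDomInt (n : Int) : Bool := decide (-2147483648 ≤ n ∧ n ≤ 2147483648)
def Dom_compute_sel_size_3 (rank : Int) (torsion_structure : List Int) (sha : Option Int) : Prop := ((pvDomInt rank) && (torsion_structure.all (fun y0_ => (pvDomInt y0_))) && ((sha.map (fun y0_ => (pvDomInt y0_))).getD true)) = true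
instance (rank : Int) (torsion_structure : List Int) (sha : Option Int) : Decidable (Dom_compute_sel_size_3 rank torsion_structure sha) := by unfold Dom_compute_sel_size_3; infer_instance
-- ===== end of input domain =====

-- B never divides sha: it tests sha against a growing modulus t = 3, 27, 243, … (odd powers of 3)
-- and collects everything into one exponent accumulator (objective: alternative decomposition, same cost).

-- ===== PORT A =====
-- A's while loop:  while sha_tmp % 9 == 0: s_3 += 1; sha_tmp //= 9
-- The 's = 0' guard only makes the recursion total: Python loops forever there (excluded by Pre_).
def pvALoop (s : Int) (acc : Int) : Int × Int :=
  if hs : s = 0 then (acc, s)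
  else if h9 : PySem.Int.mod s 9 = 0 then
    pvALoop (PySem.Int.floordiv s 9) (acc + 1)
  else (acc, s)
termination_by s.natAbs
decreasing_by
  have h := PySem.Int.floordiv_mul_add_mod s 9
  rw [h9] at h
  omega

def compute_sel_size_3 (rank : Int) (torsion_structure : List Int) (sha : Option Int) : Option Int :=
  match sha with
  | none => none
  | some shaVal =>
    let t_3 : Int := torsion_structure.foldl (fun acc ts => if PySem.Int.mod ts 3 = 0 then acc + 1 else acc) 0
    let p := pvALoop shaVal 0
    let s_3 : Int := if PySem.Int.mod p.2 3 = 0 then p.1 + 1 else p.1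
    -- Pre_ keeps rank + t_3 + s_3 ≥ 0; for a negative exponent Python's 3**e is a float (excluded)
    some (3 ^ (rank + t_3 + s_3).toNat)

-- ===== PORT B =====
-- B's while loop:  while sha % t == 0: e += 1; t *= 9   (t starts at 3; sha is never changed)
-- The guard 's = 0 ∨ t ≤ 0' only makes the recursion total: at sha = 0 Python loops forever
-- (excluded by Pre_), and t ≤ 0 is unreachable from the initial call t = 3.
def pvBLoop (s : Int) (e : Int) (t : Int) : Int :=
  if h0 : s = 0 ∨ t ≤ 0 then e
  else if hm : PySem.Int.mod s t = 0 then pvBLoop s (e + 1) (t * 9) else e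
termination_by s.natAbs / t.natAbs
decreasing_by
  push_neg at h0
  have hdvd : t ∣ s := (PySem.Int.mod_eq_zero_iff_dvd s t).mp hm
  have h1 : t.natAbs ∣ s.natAbs := Int.natAbs_dvd_natAbs.mpr hdvd
  have hspos : 0 < s.natAbs := Int.natAbs_pos.mpr h0.1
  have h2 : 1 ≤ s.natAbs / t.natAbs :=
    (Nat.one_le_div_iff (Int.natAbs_pos.mpr (by omega))).mpr (Nat.le_of_dvd hspos h1)
  have h3 : (t * 9).natAbs = t.natAbs * 9 := by
    rw [Int.natAbs_mul]; rfl
  rw [h3, ← Nat.div_div_eq_div_mul]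
  omega

def compute_sel_size_3_alt (rank : Int) (torsion_structure : List Int) (sha : Option Int) : Option Int :=
  match sha with
  | none => none
  | some shaVal =>
    let e0 : Int := torsion_structure.foldl (fun acc ts => if PySem.Int.mod ts 3 = 0 then acc + 1 else acc) rank
    some (3 ^ (pvBLoop shaVal e0 3).toNat)

-- ===== PRECONDITION & SPEC =====
-- pvV3 n = 3-adic valuation of n (a plain arithmetic helper used only to state Pre_'s exponent bound)
def pvV3 (n : Nat) : Nat :=
  if h : n % 3 = 0 ∧ n ≠ 0 then pvV3 (n / 3) + 1 else 0
termination_by n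
decreasing_by exact Nat.div_lt_self (Nat.pos_of_ne_zero h.2) (by norm_num)

-- Pre_ excludes sha = 0, where Python's while loop (in A and B alike) runs forever, and a present
-- sha whose final exponent rank + t_3 + s_3 is negative, where Python's 3**e is a float, not an
-- int of the declared return type; every input on which A returns an int is admitted.
def Pre_compute_sel_size_3 (rank : Int) (torsion_structure : List Int) (sha : Option Int) : Prop :=
  sha ≠ some 0 ∧ (sha = none ∨
    0 ≤ rank + (torsion_structure.countP (fun x => PySem.Int.mod x 3 = 0) : Int)
          + (((pvV3 (sha.getD 0).natAbs + 1) / 2 : Nat) : Int))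
instance (rank : Int) (torsion_structure : List Int) (sha : Option Int) : Decidable (Pre_compute_sel_size_3 rank torsion_structure sha) := by unfold Pre_compute_sel_size_3; infer_instance

def pvWitness_compute_sel_size_3 : Int × List Int × Option Int := (1, [3, 5], some 18)

def Spec_compute_sel_size_3 (rank : Int) (torsion_structure : List Int) (sha : Option Int) (out : Option Int) : Prop := out = compute_sel_size_3_alt rank torsion_structure sha
instance (rank : Int) (torsion_structure : List Int) (sha : Option Int) (out : Option Int) : Decidable (Spec_compute_sel_size_3 rank torsion_structure sha out) := by unfold Spec_compute_sel_size_3; infer_instance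

-- ===== CLAIM (what is proved, stated in full; the proofs are below) =====
def Claim_equal_compute_sel_size_3 : Prop := ∀ (rank : Int) (torsion_structure : List Int) (sha : Option Int), Dom_compute_sel_size_3 rank torsion_structure sha → Pre_compute_sel_size_3 rank torsion_structure sha → Spec_compute_sel_size_3 rank torsion_structure sha (compute_sel_size_3 rank torsion_structure sha)

-- ===== LEMMAS AND PROOFS =====

theorem pvALoop_unfold (s acc : Int) : pvALoop s acc =
    if s = 0 then (acc, s)
    else if PySem.Int.mod s 9 = 0 then pvALoop (PySem.Int.floordiv s 9) (acc + 1)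
    else (acc, s) := by
  conv_lhs => rw [pvALoop]
  split_ifs <;> rfl

theorem pvBLoop_unfold (s e t : Int) : pvBLoop s e t =
    if s = 0 ∨ t ≤ 0 then e
    else if PySem.Int.mod s t = 0 then pvBLoop s (e + 1) (t * 9)
    else e := by
  conv_lhs => rw [pvBLoop]
  split_ifs <;> rfl

theorem pvALoop_shift (s : Int) : ∀ acc, pvALoop s acc = ((pvALoop s 0).1 + acc, (pvALoop s 0).2) := by
  induction hn : s.natAbs using Nat.strong_induction_on generalizing s with
  | _ n ih =>
  intro acc
  by_cases hs : s = 0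
  · rw [pvALoop_unfold s acc, pvALoop_unfold s 0, if_pos hs, if_pos hs]; norm_num
  · by_cases h9 : PySem.Int.mod s 9 = 0
    · have h := PySem.Int.floordiv_mul_add_mod s 9
      rw [h9] at h
      rw [pvALoop_unfold s acc, pvALoop_unfold s 0, if_neg hs, if_neg hs, if_pos h9, if_pos h9]
      rw [ih (PySem.Int.floordiv s 9).natAbs (by omega) _ rfl (acc + 1),
          ih (PySem.Int.floordiv s 9).natAbs (by omega) _ rfl (0 + 1)]
      simp only [Prod.mk.injEq]
      exact ⟨by ring, trivial⟩
    · rw [pvALoop_unfold s acc, pvALoop_unfold s 0, if_neg hs, if_neg hs, if_neg h9, if_neg h9]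
      norm_num

theorem pvV3_unfold (n : Nat) : pvV3 n = if n % 3 = 0 ∧ n ≠ 0 then pvV3 (n / 3) + 1 else 0 := by
  conv_lhs => rw [pvV3]
  split_ifs <;> rfl

theorem pvV3_mul3 (n : Nat) (hn : n ≠ 0) : pvV3 (3 * n) = pvV3 n + 1 := by
  rw [pvV3_unfold (3 * n), if_pos ⟨Nat.mul_mod_right 3 n, by omega⟩, Nat.mul_div_cancel_left n (by norm_num)]

theorem pow3_dvd_iff (n k : Nat) (hn : n ≠ 0) : 3 ^ k ∣ n ↔ k ≤ pvV3 n := by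
  revert hn
  induction n using Nat.strong_induction_on generalizing k with
  | _ n ih =>
  intro hn
  by_cases h3 : 3 ∣ n
  · obtain ⟨q, hq⟩ := h3
    have hq0 : q ≠ 0 := by rintro rfl; omega
    have hv : pvV3 n = pvV3 q + 1 := by rw [hq]; exact pvV3_mul3 q hq0
    cases k with
    | zero => simp
    | succ j =>
      have hlt : q < n := by omega
      rw [hv, hq, pow_succ, mul_comm (3 ^ j) 3, Nat.mul_dvd_mul_iff_left (by norm_num : 0 < 3),
          ih q hlt j hq0]
      omega
  · have hv : pvV3 n = 0 := by
      rw [pvV3_unfold, if_neg]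
      rintro ⟨hmod, -⟩
      exact h3 (Nat.dvd_of_mod_eq_zero hmod)
    rw [hv]
    constructor
    · intro hd
      by_contra hk
      exact h3 (dvd_trans (dvd_pow_self 3 (by omega : k ≠ 0)) hd)
    · intro hk
      simp [Nat.le_zero.mp hk]

theorem int_pow3_dvd (s : Int) (k : Nat) (hs : s ≠ 0) : (3 : Int) ^ k ∣ s ↔ k ≤ pvV3 s.natAbs := by
  rw [← Int.natAbs_dvd_natAbs, Int.natAbs_pow]
  exact pow3_dvd_iff s.natAbs k (Int.natAbs_ne_zero.mpr hs)

-- A's loop result, after the mod-3 fixup, is ⌈v/2⌉ = (v+1)/2 for v the 3-adic valuation of sha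
theorem A_s3 (s : Int) (hs : s ≠ 0) :
    (if PySem.Int.mod (pvALoop s 0).2 3 = 0 then (pvALoop s 0).1 + 1 else (pvALoop s 0).1)
      = (((pvV3 s.natAbs + 1) / 2 : Nat) : Int) := by
  induction hn : s.natAbs using Nat.strong_induction_on generalizing s with
  | _ n ih =>
  subst hn
  by_cases h9 : PySem.Int.mod s 9 = 0
  · have h := PySem.Int.floordiv_mul_add_mod s 9
    rw [h9] at h
    set q := PySem.Int.floordiv s 9 with hqdef
    have hq0 : q ≠ 0 := by intro hq; apply hs; omega
    have habs : s.natAbs = 3 * (3 * q.natAbs) := by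
      have : s = q * 9 := by omega
      rw [this, Int.natAbs_mul]
      have h9abs : (9 : Int).natAbs = 9 := rfl
      rw [h9abs]
      ring
    have hv : pvV3 s.natAbs = pvV3 q.natAbs + 2 := by
      rw [habs, pvV3_mul3 (3 * q.natAbs) (by positivity),
          pvV3_mul3 q.natAbs (Int.natAbs_ne_zero.mpr hq0)]
    have hA : pvALoop s 0 = ((pvALoop q 0).1 + 1, (pvALoop q 0).2) := by
      rw [pvALoop_unfold s 0, if_neg hs, if_pos h9, ← hqdef, pvALoop_shift q (0 + 1)]
      norm_num
    have hlt : q.natAbs < s.natAbs := by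
      have := Int.natAbs_ne_zero.mpr hq0
      omega
    have hih := ih q.natAbs hlt q hq0 rfl
    rw [hA, hv]
    simp only
    split_ifs at hih ⊢ with hc <;> omega
  · have hA : pvALoop s 0 = (0, s) := by
      rw [pvALoop_unfold s 0, if_neg hs, if_neg h9]
    by_cases h3 : PySem.Int.mod s 3 = 0
    · have h1 : 1 ≤ pvV3 s.natAbs := by
        rw [← int_pow3_dvd s 1 hs, pow_one]
        exact (PySem.Int.mod_eq_zero_iff_dvd s 3).mp h3
      have h2 : ¬ 2 ≤ pvV3 s.natAbs := by
        intro h2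
        apply h9
        rw [PySem.Int.mod_eq_zero_iff_dvd]
        have := (int_pow3_dvd s 2 hs).mpr h2
        norm_num at this
        exact this
      have hv : pvV3 s.natAbs = 1 := by omega
      rw [hA, hv]
      simp only
      rw [if_pos h3]
      decide
    · have h1 : ¬ 1 ≤ pvV3 s.natAbs := by
        intro h1
        apply h3
        rw [PySem.Int.mod_eq_zero_iff_dvd]
        have := (int_pow3_dvd s 1 hs).mpr h1
        rwa [pow_one] at this
      have hv : pvV3 s.natAbs = 0 := by omega
      rw [hA, hv]
      simp only
      rw [if_neg h3]
      decide

-- B's loop at modulus 3·9^j adds the remaining (v+1)/2 − j steps to the accumulator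
theorem B_s3 (s : Int) (hs : s ≠ 0) : ∀ (j : Nat) (e : Int),
    pvBLoop s e (3 * 9 ^ j) = e + (((pvV3 s.natAbs + 1) / 2 - j : Nat) : Int) := by
  intro j
  induction hk : (pvV3 s.natAbs + 1) / 2 - j using Nat.strong_induction_on generalizing j with
  | _ k ih =>
  intro e
  have htpos : (0 : Int) < 3 * 9 ^ j := by positivity
  have hguard : ¬ (s = 0 ∨ (3 : Int) * 9 ^ j ≤ 0) := by
    rintro (h | h)
    · exact hs h
    · omega
  have hpow : (3 : Int) * 9 ^ j = 3 ^ (2 * j + 1) := by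
    rw [show (9 : Int) = 3 ^ 2 by norm_num, ← pow_mul, pow_succ]
    ring
  by_cases hle : 2 * j + 1 ≤ pvV3 s.natAbs
  · have hdvd : PySem.Int.mod s (3 * 9 ^ j) = 0 := by
      rw [PySem.Int.mod_eq_zero_iff_dvd, hpow]
      exact (int_pow3_dvd s (2 * j + 1) hs).mpr hle
    rw [pvBLoop_unfold, if_neg hguard, if_pos hdvd]
    have hstep : (3 : Int) * 9 ^ j * 9 = 3 * 9 ^ (j + 1) := by ring
    rw [hstep, ih ((pvV3 s.natAbs + 1) / 2 - (j + 1)) (by omega) (j + 1) rfl (e + 1)]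
    omega
  · have hnd : PySem.Int.mod s (3 * 9 ^ j) ≠ 0 := by
      intro hc
      apply hle
      rw [← int_pow3_dvd s (2 * j + 1) hs, ← hpow]
      exact (PySem.Int.mod_eq_zero_iff_dvd s (3 * 9 ^ j)).mp hc
    rw [pvBLoop_unfold, if_neg hguard, if_neg hnd]
    omega

theorem foldl_shift (l : List Int) (a : Int) :
    l.foldl (fun acc t => if PySem.Int.mod t 3 = 0 then acc + 1 else acc) a
      = a + l.foldl (fun acc t => if PySem.Int.mod t 3 = 0 then acc + 1 else acc) 0 := by
  induction l generalizing a with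
  | nil => simp
  | cons x xs ih =>
    simp only [List.foldl_cons]
    by_cases h : PySem.Int.mod x 3 = 0
    · rw [if_pos h, if_pos h, ih (a + 1), ih (0 + 1)]; ring
    · rw [if_neg h, if_neg h, ih a]

-- ===== VERDICT (by name: the statement is the Claim_ definition above) =====
theorem compute_sel_size_3_spec : Claim_equal_compute_sel_size_3 := by
  intro rank ts sha _ hpre
  unfold Spec_compute_sel_size_3
  obtain ⟨hne, _⟩ := hpre
  match sha with
  | none => rfl
  | some s =>
    have hs : s ≠ 0 := fun h => hne (by rw [h])
    simp only [compute_sel_size_3, compute_sel_size_3_alt]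
    rw [foldl_shift ts rank]
    have hB := B_s3 s hs 0 (rank + ts.foldl (fun acc t => if PySem.Int.mod t 3 = 0 then acc + 1 else acc) 0)
    rw [show (3 : Int) * 9 ^ 0 = 3 from by norm_num, Nat.sub_zero] at hB
    rw [hB, A_s3 s hs]
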